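-- pv_equiv track=rewrite | github.com/mrbestnaija/portofolio_maximizer | scripts/pmx_observability_exporter.py | _worst_model_status
-- ===== SOURCE A (Python) =====
-- from typing import Any, Callable, Dict, Iterable, List, Optional, Tuple
--
-- def _worst_model_status(results: Iterable[Dict[str, Any]]) -> str:
--     order = {"PASS": 0, "WARN": 1, "FAIL": 2, "SKIP": 3, "ERROR": 4, "UNKNOWN": 4}
--     worst_name = "PASS"
--     worst_score = -1
--     for row in results:
--         status = str(row.get("status") or "UNKNOWN").strip().upper()
--         score = order.get(status, 4)
--         if score > worst_score:
--             worst_name = status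
--             worst_score = score
--     return worst_name
-- ===== SOURCE B (Python) =====
-- def _worst_model_status(results):
--     order = {"PASS": 0, "WARN": 1, "FAIL": 2, "SKIP": 3, "ERROR": 4, "UNKNOWN": 4}
--     statuses = [str(row.get("status") or "UNKNOWN").strip().upper() for row in results]
--     if not statuses:
--         return "PASS"
--     worst = max(order.get(s, 4) for s in statuses)
--     for s in statuses:
--         if order.get(s, 4) == worst:
--             return s
--     return "PASS"  # unreachable: worst is attained by some status
-- ===== Notes on version B (the rewrite author's own statement) =====
-- stated objective: simpler
-- what changed: Replaces the running-argmax accumulator loop by a map-normalize pass, then a reduce (max severity) and a locate pass returning the first status attaining it; empty input handled by an explicit early return.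
import Mathlib
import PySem

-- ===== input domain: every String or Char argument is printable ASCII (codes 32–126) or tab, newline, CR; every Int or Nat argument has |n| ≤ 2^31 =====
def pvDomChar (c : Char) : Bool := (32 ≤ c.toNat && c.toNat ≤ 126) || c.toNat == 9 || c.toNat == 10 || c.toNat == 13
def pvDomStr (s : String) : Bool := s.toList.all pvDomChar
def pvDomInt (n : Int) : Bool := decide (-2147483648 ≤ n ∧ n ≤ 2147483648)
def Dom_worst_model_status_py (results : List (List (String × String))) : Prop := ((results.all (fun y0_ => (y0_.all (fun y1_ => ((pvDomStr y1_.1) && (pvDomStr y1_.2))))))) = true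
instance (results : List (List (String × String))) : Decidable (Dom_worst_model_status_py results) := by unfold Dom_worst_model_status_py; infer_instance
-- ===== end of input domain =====

-- B replaces A's running-argmax accumulator loop by normalize / max-severity / first-attaining-locate passes (same return value; objective: simpler decomposition).

-- the literal severity dict, shared verbatim by both Pythons
def pvOrder : PySem.Dict String Int :=
  PySem.Dict.mk [("PASS", 0), ("WARN", 1), ("FAIL", 2), ("SKIP", 3), ("ERROR", 4), ("UNKNOWN", 4)]

-- order.get(status, 4)
def pvScore (s : String) : Int := PySem.Dict.getD pvOrder s 4

-- str(row.get("status") or "UNKNOWN").strip().upper()  (identical expression in both Pythons)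
def pvNorm (row : List (String × String)) : String :=
  PySem.Str.upper (PySem.Str.strip
    (match (PySem.Dict.mk row).get? "status" with
     | some v => if v = "" then "UNKNOWN" else v
     | none => "UNKNOWN"))

-- ===== PORT A =====
def worst_model_status_py (results : List (List (String × String))) : String :=
  (results.foldl
    (fun (acc : String × Int) row =>
      let status := pvNorm row
      let score := pvScore status
      if score > acc.2 then (status, score) else acc)
    ("PASS", -1)).1

-- ===== PORT B =====
def worst_model_status_py_alt (results : List (List (String × String))) : String :=
  let statuses := results.map pvNorm
  match statuses with
  | [] => "PASS"
  | s :: rest =>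
    let worst := (rest.map pvScore).foldl max (pvScore s)   -- max(order.get(s,4) for s in statuses)
    (((s :: rest).find? (fun t => pvScore t == worst)).getD "PASS")  -- first status attaining worst; default unreachable

-- ===== PRECONDITION & SPEC =====
def Spec_worst_model_status_py (results : List (List (String × String))) (out : String) : Prop := out = worst_model_status_py_alt results
instance (results : List (List (String × String))) (out : String) : Decidable (Spec_worst_model_status_py results out) := by unfold Spec_worst_model_status_py; infer_instance

-- ===== CLAIM (what is proved, stated in full; the proofs are below) =====
def Claim_equal_worst_model_status_py : Prop := ∀ (results : List (List (String × String))), Dom_worst_model_status_py results → Spec_worst_model_status_py results (worst_model_status_py results)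

-- ===== LEMMAS AND PROOFS =====

theorem pvScore_nonneg (s : String) : 0 ≤ pvScore s := by
  unfold pvScore pvOrder
  simp [PySem.Dict.getD_eq_get?_getD, PySem.Dict.get?_mk_cons]
  split_ifs <;> simp [PySem.Dict.get?]

theorem le_foldl_max_score (l : List String) (m : Int) :
    m ≤ (l.map pvScore).foldl max m := by
  induction l generalizing m with
  | nil => simp
  | cons t l ih => exact le_trans (le_max_left m (pvScore t)) (ih _)

/-- A's step function. -/
def pvStep (acc : String × Int) (t : String) : String × Int :=
  if pvScore t > acc.2 then (t, pvScore t) else acc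

theorem pvLoop (l : List String) (s : String) :
    l.foldl pvStep (s, pvScore s) =
      (((s :: l).find? (fun t => pvScore t == (l.map pvScore).foldl max (pvScore s))).getD "PASS",
       (l.map pvScore).foldl max (pvScore s)) := by
  induction l generalizing s with
  | nil => simp [List.find?]
  | cons t l ih =>
    by_cases h : pvScore t > pvScore s
    · have hstep : pvStep (s, pvScore s) t = (t, pvScore t) := by
        simp [pvStep, h]
      have hmax : max (pvScore s) (pvScore t) = pvScore t := max_eq_right (le_of_lt h)
      have hW : pvScore s ≠ (l.map pvScore).foldl max (pvScore t) := by
        have := le_foldl_max_score l (pvScore t)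
        omega
      simp only [List.foldl_cons, hstep, ih t, List.map_cons, hmax]
      rw [show (List.find? (fun x => pvScore x == (l.map pvScore).foldl max (pvScore t)) (s :: t :: l))
            = List.find? (fun x => pvScore x == (l.map pvScore).foldl max (pvScore t)) (t :: l)
          from List.find?_cons_of_neg (by simpa using hW)]
    · have hstep : pvStep (s, pvScore s) t = (s, pvScore s) := by
        simp [pvStep, h]
      have hle : pvScore t ≤ pvScore s := not_lt.mp h
      have hmax : max (pvScore s) (pvScore t) = pvScore s := max_eq_left hle
      simp only [List.foldl_cons, hstep, ih s, List.map_cons, hmax]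
      by_cases hs : pvScore s = (l.map pvScore).foldl max (pvScore s)
      · rw [List.find?_cons_of_pos (by simpa using hs), List.find?_cons_of_pos (by simpa using hs)]
      · have ht : pvScore t ≠ (l.map pvScore).foldl max (pvScore s) := by
          have := le_foldl_max_score l (pvScore s)
          omega
        rw [List.find?_cons_of_neg (by simpa using hs), List.find?_cons_of_neg (by simpa using hs),
            List.find?_cons_of_neg (by simpa using ht)]

-- ===== VERDICT (by name: the statement is the Claim_ definition above) =====
theorem worst_model_status_py_spec : Claim_equal_worst_model_status_py := by
  intro results _
  unfold Spec_worst_model_status_py worst_model_status_py worst_model_status_py_alt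
  rw [show (fun (acc : String × Int) row =>
        let status := pvNorm row
        let score := pvScore status
        if score > acc.2 then (status, score) else acc)
      = (fun acc row => pvStep acc (pvNorm row)) from rfl,
    ← List.foldl_map (f := pvNorm) (g := pvStep)]
  cases results with
  | nil => rfl
  | cons r rs =>
    simp only [List.map_cons, List.foldl_cons]
    rw [show pvStep ("PASS", -1) (pvNorm r) = (pvNorm r, pvScore (pvNorm r)) from by
      have h0 := pvScore_nonneg (pvNorm r)
      unfold pvStep
      rw [if_pos (by omega)]]
    rw [pvLoop]
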